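-- pv_equiv track=rewrite | github.com/Coki628/kyopro_submissions | yukicoder/791.py | check
-- ===== SOURCE A (Python) =====
-- INF = 10 ** 18
--
-- def check(S):
--     N = len(S)
--     if N < 2:
--         return INF
--     res = 0
--     if S[0] != '1':
--         return INF
--     for i in range(1, N):
--         if S[i] != '3':
--             return INF
--         res += 1
--     return res
-- ===== SOURCE B (Python) =====
-- INF = 10 ** 18
--
-- def check(S):
--     N = len(S)
--     if N < 2:
--         return INF
--     if S == '1' + '3' * (N - 1):
--         return N - 1
--     return INF
-- ===== Notes on version B (the rewrite author's own statement) =====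
-- stated objective: simpler
-- what changed: Replaces the character-by-character validate-and-count loop with a single equality test of the whole string against the expected pattern (a one followed by threes) and a closed-form count of N-1.
import Mathlib
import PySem

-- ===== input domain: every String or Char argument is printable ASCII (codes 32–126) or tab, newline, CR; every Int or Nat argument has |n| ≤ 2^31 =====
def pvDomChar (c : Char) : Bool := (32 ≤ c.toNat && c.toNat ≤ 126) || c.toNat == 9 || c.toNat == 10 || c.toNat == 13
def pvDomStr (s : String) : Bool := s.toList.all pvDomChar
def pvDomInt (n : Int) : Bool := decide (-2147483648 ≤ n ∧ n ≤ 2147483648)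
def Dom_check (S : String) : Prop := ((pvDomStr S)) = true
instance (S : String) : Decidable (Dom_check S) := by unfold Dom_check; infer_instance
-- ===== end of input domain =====

-- B validates the input with one equality test against the pattern '1'+'3'*(N-1)
-- and returns the closed-form count N-1, instead of A's per-character loop. Objective: simpler.

-- ===== PORT A =====
def pvINF : Int := 10 ^ 18

-- the for-loop over S[1:], accumulating res
def checkLoop : List Char → Int → Int
  | [], res => res
  | c :: rest, res => if c ≠ '3' then pvINF else checkLoop rest (res + 1)

def check (S : String) : Int :=
  let l := S.toList
  if l.length < 2 then pvINF
  else match l with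
    | [] => pvINF
    | c :: rest => if c ≠ '1' then pvINF else checkLoop rest 0

-- ===== PORT B =====
def check_alt (S : String) : Int :=
  let N := S.toList.length
  if N < 2 then pvINF
  else if S.toList = '1' :: List.replicate (N - 1) '3' then (N : Int) - 1
  else pvINF

-- ===== PRECONDITION & SPEC =====
def Spec_check (S : String) (out : Int) : Prop := out = check_alt S
instance (S : String) (out : Int) : Decidable (Spec_check S out) := by unfold Spec_check; infer_instance

-- ===== CLAIM (what is proved, stated in full; the proofs are below) =====
def Claim_equal_check : Prop := ∀ (S : String), Dom_check S → Spec_check S (check S)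

-- ===== LEMMAS AND PROOFS =====

-- ===== VERDICT (by name: the statement is the Claim_ definition above) =====
lemma checkLoop_eq (rest : List Char) (res : Int) :
    checkLoop rest res =
      if rest = List.replicate rest.length '3' then res + rest.length else pvINF := by
  induction rest generalizing res with
  | nil => simp [checkLoop]
  | cons c t ih =>
    by_cases hc : c = '3'
    · subst hc
      simp only [checkLoop, ne_eq, not_true_eq_false, if_false, ih,
        List.length_cons, List.replicate_succ, List.cons.injEq, true_and]
      split_ifs with h
      · push_cast; ring
      · rfl
    · simp [checkLoop, hc, List.replicate_succ]

theorem check_spec : Claim_equal_check := by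
  intro S _
  unfold Spec_check check check_alt
  cases h : S.toList with
  | nil => simp
  | cons c rest =>
    cases rest with
    | nil => simp
    | cons c2 t =>
      simp only [List.length_cons, checkLoop_eq]
      have hlen : ¬ (t.length + 1 + 1 < 2) := by omega
      simp only [hlen, if_false]
      by_cases hc : c = '1'
      · subst hc
        have hn : t.length + 1 + 1 - 1 = t.length + 1 := by omega
        simp only [ne_eq, not_true_eq_false, if_false, hn]
        by_cases h3 : c2 :: t = List.replicate (c2 :: t).length '3'
        · have : ('1' :: c2 :: t) = '1' :: List.replicate (t.length + 1) '3' := by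
            simpa using congrArg (List.cons '1') h3
          simp only [List.length_cons] at h3
          simp [h3]
        · have : ¬ ('1' :: c2 :: t) = '1' :: List.replicate (t.length + 1) '3' := by
            simpa using h3
          simp only [List.length_cons] at h3
          simp [h3]
      · simp [hc]
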